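-- pv_equiv track=rewrite | github.com/DeeKahy/Project-Choice-Maxxing | voting-app/algorithms.py | round_to_significant_digits
-- ===== SOURCE A (Python) =====
-- def round_to_significant_digits(string, n):
--     """Return string cut off at the nth significant digit."""
--     count = 0
--     for i, ch in enumerate(string):
--         if ch.isdigit() and ch != "0":
--             count += 1
--             if count == n:
--                 return string[: i + 1]
--     return string
-- ===== SOURCE B (Python) =====
-- def round_to_significant_digits(string, n):
--     """Return string cut off at the nth significant digit."""
--     def is_sig(ch):
--         return ch.isdigit() and ch != "0"
--     remaining = sum(1 for ch in string if is_sig(ch))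
--     if n <= 0 or n > remaining:
--         return string
--     chars = list(string)
--     while remaining > n or not is_sig(chars[-1]):
--         if is_sig(chars.pop()):
--             remaining -= 1
--     return "".join(chars)
-- ===== Notes on version B (the rewrite author's own statement) =====
-- stated objective: alternative
-- what changed: B counts significant digits once, then trims the string from the RIGHT end, popping trailing characters until exactly n significant digits remain and the last character is significant, instead of A's left-to-right scan with early return at the nth hit.
import Mathlib
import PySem

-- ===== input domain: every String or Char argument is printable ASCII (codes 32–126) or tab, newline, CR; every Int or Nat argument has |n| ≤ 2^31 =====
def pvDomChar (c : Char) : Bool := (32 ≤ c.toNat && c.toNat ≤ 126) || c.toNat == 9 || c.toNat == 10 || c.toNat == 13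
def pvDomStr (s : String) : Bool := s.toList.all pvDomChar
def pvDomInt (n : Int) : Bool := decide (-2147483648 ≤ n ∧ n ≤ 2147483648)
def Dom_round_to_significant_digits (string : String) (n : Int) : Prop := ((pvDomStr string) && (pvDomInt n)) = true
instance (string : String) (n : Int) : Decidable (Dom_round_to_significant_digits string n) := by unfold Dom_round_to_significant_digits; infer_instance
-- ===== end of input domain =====

-- B counts the significant digits once and then trims the string from the RIGHT end,
-- instead of A's left-to-right scan with early return; equivalence is exact (both total).

-- ===== PORT A =====
-- the for-loop of A: walks the enumerated characters carrying the running count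
def pvGoA (s : String) (n : Int) : List (Int × Char) → Int → String
  | [], _ => s
  | (i, ch) :: rest, count =>
    if PySem.Chars.isdigit ch && ch != '0' then
      let count := count + 1
      if count == n then String.ofList (PySem.List.slice s.toList none (some (i + 1)))
      else pvGoA s n rest count
    else pvGoA s n rest count

def round_to_significant_digits (string : String) (n : Int) : String :=
  pvGoA string n (PySem.List.enumerate string.toList 0) 0

-- ===== PORT B =====
def pvIsSig (c : Char) : Bool := PySem.Chars.isdigit c && c != '0'

-- the while-loop of B: popping from the end of `chars` = consuming the head of the reversed list
def pvTrim (n : Int) : Int → List Char → List Char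
  | remaining, c :: rest =>
    if remaining > n || !pvIsSig c then
      pvTrim n (if pvIsSig c then remaining - 1 else remaining) rest
    else c :: rest
  | _, [] => []   -- unreachable when the loop is entered with remaining ≥ n > 0

def round_to_significant_digits_alt (string : String) (n : Int) : String :=
  let l := string.toList
  let remaining : Int := (l.countP (fun c => pvIsSig c) : Int)
  if n ≤ 0 || remaining < n then string
  else String.ofList ((pvTrim n remaining l.reverse).reverse)

-- ===== PRECONDITION & SPEC =====
def Spec_round_to_significant_digits (string : String) (n : Int) (out : String) : Prop := out = round_to_significant_digits_alt string n
instance (string : String) (n : Int) (out : String) : Decidable (Spec_round_to_significant_digits string n out) := by unfold Spec_round_to_significant_digits; infer_instance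

-- ===== CLAIM (what is proved, stated in full; the proofs are below) =====
def Claim_equal_round_to_significant_digits : Prop := ∀ (string : String) (n : Int), Dom_round_to_significant_digits string n → Spec_round_to_significant_digits string n (round_to_significant_digits string n)

-- ===== LEMMAS AND PROOFS =====

-- mid-level specification: `some t` = the prefix ending at the nth significant digit, none = no cut
def pvCut (n : Int) : List Char → Option (List Char)
  | [] => none
  | c :: rest =>
    if pvIsSig c then
      if n = 1 then some [c] else (pvCut (n - 1) rest).map (c :: ·)
    else (pvCut n rest).map (c :: ·)

theorem pvCut_none (l : List Char) : ∀ n : Int, n ≤ 0 ∨ (l.countP (fun c => pvIsSig c) : Int) < n → pvCut n l = none := by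
  induction l with
  | nil => intro n _; rfl
  | cons c rest ih =>
    intro n hn
    simp only [List.countP_cons] at hn
    by_cases hc : pvIsSig c = true
    · simp only [hc, if_true] at hn
      push_cast at hn
      have h1 : ¬ (n = 1) := by omega
      have h2 : n - 1 ≤ 0 ∨ ((rest.countP (fun c => pvIsSig c)) : Int) < n - 1 := by omega
      simp [pvCut, hc, h1, ih (n - 1) h2]
    · simp only [hc] at hn
      simp [pvCut, hc, ih n hn]

theorem pvCut_append (l : List Char) : ∀ (n : Int) (t m : List Char), pvCut n l = some t → pvCut n (l ++ m) = some t := by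
  induction l with
  | nil => intro n t m h; simp [pvCut] at h
  | cons c rest ih =>
    intro n t m h
    by_cases hc : pvIsSig c = true
    · by_cases h1 : n = 1
      · simp_all [pvCut]
      · simp only [pvCut, hc, h1, if_false, if_true, List.cons_append] at h ⊢
        obtain ⟨t', ht', rfl⟩ := Option.map_eq_some_iff.mp h
        simp [ih _ _ m ht']
    · simp only [pvCut, hc, Bool.false_eq_true, if_false, List.cons_append] at h ⊢
      obtain ⟨t', ht', rfl⟩ := Option.map_eq_some_iff.mp h
      simp [ih _ _ m ht']

-- last char significant, n = total count: the cut keeps everything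
theorem pvCut_full (c : Char) (hc : pvIsSig c = true) :
    ∀ (l : List Char) (n : Int), n = (l.countP (fun x => pvIsSig x) : Int) + 1 →
      pvCut n (l ++ [c]) = some (l ++ [c]) := by
  intro l
  induction l with
  | nil => intro n hn; simp at hn; simp [pvCut, hn, hc]
  | cons d rest ih =>
    intro n hn
    simp only [List.countP_cons] at hn
    by_cases hd : pvIsSig d = true
    · simp only [hd, if_true] at hn
      push_cast at hn
      have h1 : ¬ (n = 1) := by omega
      simp only [List.cons_append, pvCut, hd, h1, if_false, if_true]
      rw [ih (n - 1) (by omega)]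
      rfl
    · simp only [hd] at hn
      simp only [List.cons_append, pvCut, hd, Bool.false_eq_true, if_false]
      rw [ih n hn]
      rfl

-- B's trimming loop computes the cut when 0 < n ≤ count
theorem pvTrim_eq_cut (l : List Char) : ∀ n : Int, 0 < n → n ≤ (l.countP (fun c => pvIsSig c) : Int) →
    pvCut n l = some ((pvTrim n (l.countP (fun c => pvIsSig c) : Int) l.reverse).reverse) := by
  induction l using List.reverseRecOn with
  | nil => intro n h1 h2; simp at h2; omega
  | append_singleton l' c ih =>
    intro n h1 h2
    have hcnt : (l' ++ [c]).countP (fun c => pvIsSig c)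
        = l'.countP (fun c => pvIsSig c) + (if pvIsSig c then 1 else 0) := by
      simp [List.countP_append, List.countP_cons]
    rw [List.reverse_append, List.reverse_singleton, List.singleton_append]
    by_cases hc : pvIsSig c = true
    · rw [hcnt] at h2 ⊢
      simp only [hc, if_true] at h2 ⊢
      push_cast at h2 ⊢
      by_cases he : n = (l'.countP (fun x => pvIsSig x) : Int) + 1
      · -- the loop condition is false immediately: keep everything
        rw [pvTrim, if_neg (by simp [hc]; omega)]
        rw [pvCut_full c hc l' n he]
        simp
      · have hlt : n ≤ (l'.countP (fun x => pvIsSig x) : Int) := by omega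
        rw [pvTrim, if_pos (by simp [hc]; omega)]
        simp only [hc, if_true]
        have hm : (l'.countP (fun c => pvIsSig c) : Int) + 1 - 1 = (l'.countP (fun c => pvIsSig c) : Int) := by omega
        rw [hm]
        exact pvCut_append l' n _ [c] (ih n h1 hlt)
    · have hc' : pvIsSig c = false := by simpa using hc
      rw [hcnt] at h2 ⊢
      simp only [hc', Bool.false_eq_true, if_false, Nat.add_zero] at h2 ⊢
      rw [pvTrim, if_pos (by simp [hc'])]
      simp only [hc', Bool.false_eq_true, if_false]
      exact pvCut_append l' n _ [c] (ih n h1 h2)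

-- A's loop computes the cut (generalized over the consumed prefix and running count)
theorem pvGoA_eq_cut (s : String) (n : Int) :
    ∀ (l pre : List Char) (count : Int), s.toList = pre ++ l →
      pvGoA s n (PySem.List.enumerate l (pre.length : Int)) count =
        (match pvCut (n - count) l with
         | some t => String.ofList (pre ++ t)
         | none => s) := by
  intro l
  induction l with
  | nil => intro pre count _; simp [PySem.List.enumerate_nil, pvGoA, pvCut]
  | cons c rest ih =>
    intro pre count hs
    rw [PySem.List.enumerate_cons]
    by_cases hc : (PySem.Chars.isdigit c && c != '0') = true
    · have hsig : pvIsSig c = true := hc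
      by_cases he : count + 1 = n
      · have hbeq : (count + 1 == n) = true := by simpa using he
        have h1 : n - count = 1 := by omega
        simp only [pvGoA, hc, if_true, hbeq, h1, pvCut, hsig]
        have hcast : (pre.length : Int) + 1 = ((pre.length + 1 : Nat) : Int) := by push_cast; ring
        rw [hcast, PySem.List.slice_to_natCast, hs]
        simp [List.take_append, List.take_of_length_le]
      · have hbeq : (count + 1 == n) = false := by simpa using he
        have h1 : ¬ (n - count = 1) := by omega
        simp only [pvGoA, hc, if_true, hbeq, Bool.false_eq_true, if_false]
        have hpre : (pre.length : Int) + 1 = (((pre ++ [c]).length : Nat) : Int) := by simp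
        rw [hpre, ih (pre ++ [c]) (count + 1) (by simp [hs])]
        have hsub : n - (count + 1) = n - count - 1 := by omega
        rw [hsub]
        simp only [pvCut, hsig, h1, if_false, if_true]
        cases pvCut (n - count - 1) rest <;> simp
    · have hsig : pvIsSig c = false := by simpa [pvIsSig] using hc
      have hc' : (PySem.Chars.isdigit c && c != '0') = false := by simpa using hc
      simp only [pvGoA, hc', Bool.false_eq_true, if_false]
      have hpre : (pre.length : Int) + 1 = (((pre ++ [c]).length : Nat) : Int) := by simp
      rw [hpre, ih (pre ++ [c]) count (by simp [hs])]
      simp only [pvCut, hsig, Bool.false_eq_true, if_false]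
      cases pvCut (n - count) rest <;> simp

-- ===== VERDICT (by name: the statement is the Claim_ definition above) =====
theorem round_to_significant_digits_spec : Claim_equal_round_to_significant_digits := by
  intro s n _
  unfold Spec_round_to_significant_digits round_to_significant_digits round_to_significant_digits_alt
  have hA := pvGoA_eq_cut s n s.toList [] 0 (by simp)
  simp only [List.length_nil, Nat.cast_zero, List.nil_append, sub_zero] at hA
  rw [hA]
  by_cases h : n ≤ 0 ∨ (s.toList.countP (fun c => pvIsSig c) : Int) < n
  · rw [pvCut_none s.toList n h]
    simp only []
    rw [if_pos (by simp; omega)]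
  · have h1 : 0 < n := by omega
    have h2 : n ≤ (s.toList.countP (fun c => pvIsSig c) : Int) := by omega
    rw [pvTrim_eq_cut s.toList n h1 h2]
    simp only []
    rw [if_neg (by simp; omega)]
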